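-- pv_equiv track=rewrite | github.com/Nakao2k/pyCode | IntraTempData/IntraTempData.py | removeNgCharsFromPrimKey
-- ===== SOURCE A (Python) =====
-- def removeNgCharsFromPrimKey(argKey):
--     # 禁止文字
--     strBad = '\/:*?"<>|\t'
--     retKey = argKey
--
--     # 大文字に変換
--     retKey = retKey.upper()
--     # 左右の空白を削除
--     retKey = retKey.strip()
--
--     for c in strBad:
--         # 禁止文字を削除
--         retKey = retKey.replace(c, "")
--
--     return retKey
-- ===== SOURCE B (Python) =====
-- def removeNgCharsFromPrimKey(argKey):
--     # Same forbidden characters as the original ('\/' is backslash + slash).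
--     bad = set('\\/:*?"<>|\t')
--     normalized = argKey.upper().strip()
--     return ''.join(c for c in normalized if c not in bad)
-- ===== Notes on version B (the rewrite author's own statement) =====
-- stated objective: simpler
-- what changed: Instead of looping over the ten forbidden characters and rescanning the whole key with str.replace for each, B normalizes once (upper+strip) and makes a single pass over the key's characters, keeping those not in a precomputed forbidden set.
import Mathlib
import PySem

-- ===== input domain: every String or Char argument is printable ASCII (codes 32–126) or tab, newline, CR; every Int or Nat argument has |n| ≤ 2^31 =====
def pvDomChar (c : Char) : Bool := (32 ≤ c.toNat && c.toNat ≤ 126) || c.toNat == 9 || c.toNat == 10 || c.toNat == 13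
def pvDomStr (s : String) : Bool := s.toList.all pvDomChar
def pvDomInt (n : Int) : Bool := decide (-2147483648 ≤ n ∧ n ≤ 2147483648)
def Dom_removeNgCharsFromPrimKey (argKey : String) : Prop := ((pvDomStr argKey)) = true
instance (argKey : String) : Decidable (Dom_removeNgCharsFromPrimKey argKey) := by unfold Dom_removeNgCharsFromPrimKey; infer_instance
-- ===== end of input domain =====

-- B replaces the per-forbidden-character replace loop by one filtering pass over the
-- normalized key; the objective is a simpler single-pass decomposition.

-- ===== PORT A =====
-- A: upper, strip, then for each c in strBad do retKey = retKey.replace(c, "")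
def removeNgCharsFromPrimKey (argKey : String) : String :=
  let strBad : String := "\\/:*?\"<>|\t"
  let retKey := argKey
  let retKey := PySem.Str.upper retKey
  let retKey := PySem.Str.strip retKey
  strBad.toList.foldl (fun retKey c => PySem.Str.replace retKey (String.ofList [c]) "") retKey

-- ===== PORT B =====
-- B: one pass filtering out the forbidden-character set
def removeNgCharsFromPrimKey_alt (argKey : String) : String :=
  let bad : PySem.Set Char := PySem.Set.ofList "\\/:*?\"<>|\t".toList
  let normalized := PySem.Str.strip (PySem.Str.upper argKey)
  String.ofList (normalized.toList.filter (fun c => !(bad.contains c)))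

-- ===== PRECONDITION & SPEC =====
def Spec_removeNgCharsFromPrimKey (argKey : String) (out : String) : Prop := out = removeNgCharsFromPrimKey_alt argKey
instance (argKey : String) (out : String) : Decidable (Spec_removeNgCharsFromPrimKey argKey out) := by unfold Spec_removeNgCharsFromPrimKey; infer_instance

-- ===== CLAIM (what is proved, stated in full; the proofs are below) =====
def Claim_equal_removeNgCharsFromPrimKey : Prop := ∀ (argKey : String), Dom_removeNgCharsFromPrimKey argKey → Spec_removeNgCharsFromPrimKey argKey (removeNgCharsFromPrimKey argKey)

-- ===== LEMMAS AND PROOFS =====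

-- replace.go with a one-char pattern and empty replacement is filtering, given enough fuel
theorem replace_go_filter (c : Char) (l acc : List Char) (fuel : Nat) (h : l.length ≤ fuel) :
    PySem.Chars.replace.go [c] [] fuel l acc =
      acc.reverse ++ l.filter (fun x => !(x == c)) := by
  induction l generalizing fuel acc with
  | nil =>
    cases fuel <;> simp [PySem.Chars.replace.go]
  | cons a t ih =>
    cases fuel with
    | zero => simp at h
    | succ fuel =>
      simp only [List.length_cons, Nat.succ_le_succ_iff] at h
      rw [PySem.Chars.replace.go]
      by_cases hac : a = c
      · subst hac
        simp [List.isPrefixOf, ih acc fuel h]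
      · have hpre : List.isPrefixOf [c] (a :: t) = false := by
          simp [List.isPrefixOf]; exact fun hh => (hac hh.symm).elim
        simp only [hpre, if_neg Bool.false_ne_true, ih (a :: acc) fuel h]
        simp [hac]

theorem replace_one_char_filter (cs : List Char) (c : Char) :
    PySem.Chars.replace cs [c] [] = cs.filter (fun x => !(x == c)) := by
  rw [PySem.Chars.replace]
  simp [replace_go_filter c cs [] cs.length (le_refl _)]

-- folding one-char replaces over a list of characters filters out all of them
theorem foldl_replace_filter (bad : List Char) (cs : List Char) :
    bad.foldl (fun r c => PySem.Chars.replace r [c] []) cs =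
      cs.filter (fun x => !(bad.contains x)) := by
  induction bad generalizing cs with
  | nil => simp
  | cons b t ih =>
    rw [List.foldl_cons, replace_one_char_filter, ih, List.filter_filter]
    apply List.filter_congr
    intro x _
    by_cases hxb : x = b <;> simp [hxb, Bool.and_comm]

-- ===== VERDICT (by name: the statement is the Claim_ definition above) =====
theorem removeNgCharsFromPrimKey_spec : Claim_equal_removeNgCharsFromPrimKey := by
  intro argKey _
  unfold Spec_removeNgCharsFromPrimKey removeNgCharsFromPrimKey removeNgCharsFromPrimKey_alt
  apply String.toList_injective
  have hfold : ∀ (bad : List Char) (t : String),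
      (bad.foldl (fun r c => PySem.Str.replace r (String.ofList [c]) "") t).toList =
        bad.foldl (fun r c => PySem.Chars.replace r [c] []) t.toList := by
    intro bad
    induction bad with
    | nil => intro t; rfl
    | cons b bt ih =>
      intro t
      rw [List.foldl_cons, List.foldl_cons, ih, PySem.Str.toList_replace,
        String.toList_ofList]
      rfl
  rw [hfold, foldl_replace_filter, String.toList_ofList]
  have hset : PySem.Set.ofList ['\\','/',':','*','?','\"','<','>','|','\t'] = (['\\','/',':','*','?','\"','<','>','|','\t'] : List Char) := by decide
  simp only [hset, String.toList_ofList]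
  rfl
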